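-- pv_equiv track=rewrite | github.com/averes12345/vinf | spark/app/join_nhs_with_wiki.py | _split_infobox_and_body
-- ===== SOURCE A (Python) =====
-- def _split_infobox_and_body(text: str) -> tuple[str | None, str]:
--     """
--     Find the first {{Infobox ...}} template and split it out.
--
--     Returns (infobox_text_or_None, remaining_text_without_infobox).
--     If no infobox is found, returns (None, original_text).
--     """
--     if text is None:
--         return None, ""
--
--     s = text
--     start = s.find("{{Infobox")
--     if start == -1:
--         return None, s
--
--     pos = start
--     depth = 0
--     end = None
--     n = len(s)
--
--     # crude brace matching for {{ ... }} with nesting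
--     while pos < n - 1:
--         two = s[pos : pos + 2]
--         if two == "{{":
--             depth += 1
--             pos += 2
--         elif two == "}}":
--             depth -= 1
--             pos += 2
--             if depth == 0:
--                 end = pos
--                 break
--         else:
--             pos += 1
--
--     if end is None:
--         # malformed, just give up and treat as no infobox
--         return None, s
--
--     infobox = s[start:end]
--     remaining = s[:start] + s[end:]
--     return infobox, remaining
-- ===== SOURCE B (Python) =====
-- def _split_infobox_and_body(text):
--     """
--     Find the first {{Infobox ...}} template and split it out.
--
--     Returns (infobox_text_or_None, remaining_text_without_infobox).
--     If no infobox is found, returns (None, original_text).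
--     """
--     if text is None:
--         return None, ""
--
--     s = text
--     start = s.find("{{Infobox")
--     if start == -1:
--         return None, s
--
--     # token-jump scan: hop straight to the next "{{" or "}}" instead of
--     # advancing one character at a time
--     pos = start
--     depth = 0
--     end = None
--     while True:
--         i_open = s.find("{{", pos)
--         i_close = s.find("}}", pos)
--         if i_close == -1:
--             break  # depth can never return to 0: malformed
--         if i_open != -1 and i_open < i_close:
--             depth += 1
--             pos = i_open + 2
--         else:
--             depth -= 1
--             pos = i_close + 2
--             if depth == 0:
--                 end = pos
--                 break
--
--     if end is None:
--         return None, s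
--
--     infobox = s[start:end]
--     remaining = s[:start] + s[end:]
--     return infobox, remaining
-- ===== Notes on version B (the rewrite author's own statement) =====
-- stated objective: alternative
-- what changed: Replaced A's character-by-character brace walk (advance by 1 past every non-brace char) with a token-jump scan that finds the next brace-pair tokens directly with str.find and hops between them, keeping the same depth counter, guards and final slicing.
import Mathlib
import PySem

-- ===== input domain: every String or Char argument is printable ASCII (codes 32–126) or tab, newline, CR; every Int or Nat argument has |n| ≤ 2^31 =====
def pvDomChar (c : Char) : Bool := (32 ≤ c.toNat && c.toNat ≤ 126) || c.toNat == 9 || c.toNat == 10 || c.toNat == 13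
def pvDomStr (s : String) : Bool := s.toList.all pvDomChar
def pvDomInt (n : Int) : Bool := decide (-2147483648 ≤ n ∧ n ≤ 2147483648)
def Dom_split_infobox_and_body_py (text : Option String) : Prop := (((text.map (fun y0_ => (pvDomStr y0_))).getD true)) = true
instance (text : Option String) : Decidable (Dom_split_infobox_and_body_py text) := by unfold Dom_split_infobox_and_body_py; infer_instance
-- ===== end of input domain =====

-- B replaces A's char-by-char brace scan by a token-jump scan (find the next "{{"/"}}"
-- directly); same guards and same final slicing. Objective: alternative scanning strategy.

-- ===== PORT A =====
-- A's while loop: pos advances by 1 past non-brace chars, by 2 past a "{{"/"}}" token;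
-- returns `some end` the moment depth returns to 0, `none` if the loop runs out.
-- `(cs.drop pos).take 2` is s[pos:pos+2] (exact: PySem.List.slice_natCast_add); pos, n
-- are the Python ints pos, len(s), both nonnegative here, so Nat `n - 1` matches.
def pvAScan (cs : List Char) (n pos : Nat) (depth : Int) : Option Nat :=
  if _h : pos < n - 1 then
    -- two = s[pos:pos+2], computed once in Python, inlined here
    if (cs.drop pos).take 2 = ['{', '{'] then pvAScan cs n (pos + 2) (depth + 1)
    else if (cs.drop pos).take 2 = ['}', '}'] then
      if depth - 1 = 0 then some (pos + 2) else pvAScan cs n (pos + 2) (depth - 1)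
    else pvAScan cs n (pos + 1) depth
  else none
termination_by n - pos
decreasing_by all_goals omega

def split_infobox_and_body_py (text : Option String) : Option String × String :=
  match text with
  | none => (none, "")
  | some s =>
    let cs := s.toList
    let start := PySem.Chars.find cs "{{Infobox".toList
    if start = -1 then (none, s)
    else
      match pvAScan cs cs.length start.toNat 0 with
      | none => (none, s)
      | some e =>
        -- s[start:end] and s[:start] + s[end:] (exact: PySem.List.slice_natCast, slice_to, slice_from)
        (some (String.ofList ((cs.drop start.toNat).take (e - start.toNat))),
         String.ofList (cs.take start.toNat ++ cs.drop e))

-- ===== PORT B =====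
-- bounds of s.find(sub, pos) needed by pvBScan's termination proof
theorem pvFindFrom_bounds (cs sub : List Char) (pos : Nat) (hne : sub ≠ [])
    (h : PySem.Chars.findFrom cs sub (pos : Int) none ≠ -1) :
    pos ≤ (PySem.Chars.findFrom cs sub (pos : Int) none).toNat ∧
    (PySem.Chars.findFrom cs sub (pos : Int) none).toNat + sub.length ≤ cs.length := by
  by_cases hp : pos ≤ cs.length
  · obtain ⟨h1, h2, _⟩ := PySem.Chars.findFrom_natCast_spec cs sub pos hp h
    have hlen := h2.length_le
    rw [List.length_drop] at hlen
    have hpos : 0 < sub.length := List.length_pos_of_ne_nil hne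
    omega
  · exfalso
    apply h
    simp only [PySem.Chars.findFrom]
    have : ¬ ((pos : Int) < 0) := by omega
    rw [if_neg this, if_pos (by omega)]

-- B's while loop: hop straight to the next "{{" or "}}" (s.find(sub, pos) twice),
-- consume the earlier one; give up when no "}}" remains.
def pvBScan (cs : List Char) (pos : Nat) (depth : Int) : Option Nat :=
  let iOpen := PySem.Chars.findFrom cs ['{', '{'] (pos : Int) none
  let iClose := PySem.Chars.findFrom cs ['}', '}'] (pos : Int) none
  if hcl : iClose = -1 then none
  else if hop : iOpen ≠ -1 ∧ iOpen < iClose then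
    pvBScan cs (iOpen.toNat + 2) (depth + 1)
  else if depth - 1 = 0 then some (iClose.toNat + 2)
  else pvBScan cs (iClose.toNat + 2) (depth - 1)
termination_by cs.length + 2 - pos
decreasing_by
  · have := pvFindFrom_bounds cs ['{', '{'] pos (by decide) hop.1
    simp only [List.length_cons, List.length_nil] at this
    omega
  · have := pvFindFrom_bounds cs ['}', '}'] pos (by decide) hcl
    simp only [List.length_cons, List.length_nil] at this
    omega

def split_infobox_and_body_py_alt (text : Option String) : Option String × String :=
  match text with
  | none => (none, "")
  | some s =>
    let cs := s.toList
    let start := PySem.Chars.find cs "{{Infobox".toList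
    if start = -1 then (none, s)
    else
      match pvBScan cs start.toNat 0 with
      | none => (none, s)
      | some e =>
        (some (String.ofList ((cs.drop start.toNat).take (e - start.toNat))),
         String.ofList (cs.take start.toNat ++ cs.drop e))

-- ===== PRECONDITION & SPEC =====
def Spec_split_infobox_and_body_py (text : Option String) (out : Option String × String) : Prop := out = split_infobox_and_body_py_alt text
instance (text : Option String) (out : Option String × String) : Decidable (Spec_split_infobox_and_body_py text out) := by unfold Spec_split_infobox_and_body_py; infer_instance

-- ===== CLAIM (what is proved, stated in full; the proofs are below) =====
def Claim_equal_split_infobox_and_body_py : Prop := ∀ (text : Option String), Dom_split_infobox_and_body_py text → Spec_split_infobox_and_body_py text (split_infobox_and_body_py text)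

-- ===== LEMMAS AND PROOFS =====

-- a 2-char token at position i is a prefix of the drop
theorem pvTok_prefix (cs : List Char) (i : Nat) (t : List Char)
    (h : (cs.drop i).take 2 = t) : t <+: cs.drop i := by
  rw [← h]; exact List.take_prefix 2 (cs.drop i)

-- no "}}" at or after pos → A's scan never closes
theorem pvAScan_noclose (cs : List Char) (pos : Nat) (depth : Int)
    (h : ¬ (['}', '}'] <:+: cs.drop pos)) :
    pvAScan cs cs.length pos depth = none := by
  rw [pvAScan]
  by_cases hlt : pos < cs.length - 1
  · rw [dif_pos hlt]
    have hsub : ∀ k, cs.drop (pos + k) = (cs.drop pos).drop k := by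
      intro k; rw [List.drop_drop]
    have hmono : ∀ k, ¬ (['}', '}'] <:+: cs.drop (pos + k)) := by
      intro k hk
      exact h (hk.trans (by rw [hsub]; exact (List.drop_suffix k (cs.drop pos)).isInfix))
    by_cases h1 : (cs.drop pos).take 2 = ['{', '{']
    · rw [if_pos h1]
      exact pvAScan_noclose cs (pos + 2) (depth + 1) (hmono 2)
    · rw [if_neg h1]
      by_cases h2 : (cs.drop pos).take 2 = ['}', '}']
      · exact absurd ((pvTok_prefix cs pos _ h2).isInfix) h
      · rw [if_neg h2]
        exact pvAScan_noclose cs (pos + 1) depth (hmono 1)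
  · rw [dif_neg hlt]
termination_by cs.length - pos
decreasing_by all_goals omega

-- no token strictly before q → A's scan just walks from pos to q
theorem pvAScan_skip (cs : List Char) (pos q : Nat) (depth : Int)
    (hle : pos ≤ q) (hq : q + 1 < cs.length)
    (hno : ∀ i, pos ≤ i → i < q →
      (cs.drop i).take 2 ≠ ['{', '{'] ∧ (cs.drop i).take 2 ≠ ['}', '}']) :
    pvAScan cs cs.length pos depth = pvAScan cs cs.length q depth := by
  rcases Nat.eq_or_lt_of_le hle with rfl | hlt
  · rfl
  · rw [pvAScan]
    have hguard : pos < cs.length - 1 := by omega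
    rw [dif_pos hguard]
    obtain ⟨h1, h2⟩ := hno pos le_rfl hlt
    rw [if_neg h1, if_neg h2]
    exact pvAScan_skip cs (pos + 1) q depth (by omega) hq
      (fun i hi1 hi2 => hno i (by omega) hi2)
termination_by q - pos
decreasing_by omega

-- the core: A's char scan equals B's token-jump scan
theorem pvScan_eq (cs : List Char) (pos : Nat) (depth : Int) (hle : pos ≤ cs.length) :
    pvAScan cs cs.length pos depth = pvBScan cs pos depth := by
  rw [pvBScan]
  by_cases hcl : PySem.Chars.findFrom cs ['}', '}'] (pos : Int) none = -1
  · rw [dif_pos hcl]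
    have : ¬ (['}', '}'] <:+: cs.drop pos) := by
      rw [PySem.Chars.findFrom_natCast cs _ pos hle] at hcl
      by_cases hf : PySem.Chars.find (cs.drop pos) ['}', '}'] = -1
      · exact (PySem.Chars.find_eq_neg_one_iff _ _).mp hf
      · exfalso
        rw [if_neg hf] at hcl
        have := PySem.Chars.findFrom_natCast_spec (cs.drop pos) ['}', '}'] 0 (by omega)
        rw [Nat.cast_zero, PySem.Chars.findFrom_zero] at this
        obtain ⟨h1, _, _⟩ := this hf
        omega
    exact pvAScan_noclose cs pos depth this
  · rw [dif_neg hcl]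
    obtain ⟨hc1, hc2, hc3⟩ := PySem.Chars.findFrom_natCast_spec cs ['}', '}'] pos hle hcl
    set ic := PySem.Chars.findFrom cs ['}', '}'] (pos : Int) none with hic
    have hcN : pos ≤ ic.toNat := by omega
    have hclen : ic.toNat + 2 ≤ cs.length := by
      have := hc2.length_le
      rw [List.length_drop] at this
      simp only [List.length_cons, List.length_nil] at this
      omega
    have hctok : (cs.drop ic.toNat).take 2 = ['}', '}'] := by
      obtain ⟨r, hr⟩ := hc2
      rw [← hr]; rfl
    by_cases hop : PySem.Chars.findFrom cs ['{', '{'] (pos : Int) none ≠ -1 ∧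
        PySem.Chars.findFrom cs ['{', '{'] (pos : Int) none < ic
    · rw [dif_pos hop]
      obtain ⟨ho1, ho2, ho3⟩ := PySem.Chars.findFrom_natCast_spec cs ['{', '{'] pos hle hop.1
      set io := PySem.Chars.findFrom cs ['{', '{'] (pos : Int) none with hio
      have hoN : pos ≤ io.toNat := by omega
      have holt : io.toNat < ic.toNat := by omega
      have hotok : (cs.drop io.toNat).take 2 = ['{', '{'] := by
        obtain ⟨r, hr⟩ := ho2
        rw [← hr]; rfl
      have hskip := pvAScan_skip cs pos io.toNat depth hoN (by omega)
        (fun i hi1 hi2 => ⟨fun ht => ho3 i hi1 hi2 (pvTok_prefix cs i _ ht),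
                          fun ht => hc3 i hi1 (by omega) (pvTok_prefix cs i _ ht)⟩)
      rw [hskip, pvAScan, dif_pos (by omega : io.toNat < cs.length - 1), if_pos hotok]
      exact pvScan_eq cs (io.toNat + 2) (depth + 1) (by omega)
    · rw [dif_neg hop]
      -- the first token at or after pos is the "}}" at ic.toNat
      have hnoopen : ∀ i, pos ≤ i → i < ic.toNat → (cs.drop i).take 2 ≠ ['{', '{'] := by
        intro i hi1 hi2 ht
        by_cases ho : PySem.Chars.findFrom cs ['{', '{'] (pos : Int) none = -1
        · rw [PySem.Chars.findFrom_natCast cs _ pos hle] at ho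
          by_cases hf : PySem.Chars.find (cs.drop pos) ['{', '{'] = -1
          · have hinf := (PySem.Chars.find_eq_neg_one_iff _ _).mp hf
            apply hinf
            have : cs.drop i = (cs.drop pos).drop (i - pos) := by
              rw [List.drop_drop]; congr 1; omega
            exact ((pvTok_prefix cs i _ ht).isInfix).trans
              (by rw [this]; exact (List.drop_suffix (i - pos) (cs.drop pos)).isInfix)
          · rw [if_neg hf] at ho
            have := PySem.Chars.findFrom_natCast_spec (cs.drop pos) ['{', '{'] 0 (by omega)
            rw [Nat.cast_zero, PySem.Chars.findFrom_zero] at this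
            obtain ⟨h1, _, _⟩ := this hf
            omega
        · obtain ⟨ho1, ho2, ho3⟩ := PySem.Chars.findFrom_natCast_spec cs ['{', '{'] pos hle ho
          have : ¬ PySem.Chars.findFrom cs ['{', '{'] (pos : Int) none < ic := by
            intro hlt'; exact hop ⟨ho, hlt'⟩
          -- io ≥ ic, so i < ic ≤ io.toNat: minimality of io refutes the token at i
          exact ho3 i hi1 (by omega) (pvTok_prefix cs i _ ht)
      have hskip := pvAScan_skip cs pos ic.toNat depth hcN (by omega)
        (fun i hi1 hi2 => ⟨hnoopen i hi1 hi2,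
                          fun ht => hc3 i hi1 hi2 (pvTok_prefix cs i _ ht)⟩)
      rw [hskip, pvAScan, dif_pos (by omega : ic.toNat < cs.length - 1),
        if_neg (by rw [hctok]; decide), if_pos hctok]
      split
      · rfl
      · exact pvScan_eq cs (ic.toNat + 2) (depth - 1) (by omega)
termination_by cs.length - pos
decreasing_by all_goals omega

-- ===== VERDICT (by name: the statement is the Claim_ definition above) =====
theorem split_infobox_and_body_py_spec : Claim_equal_split_infobox_and_body_py := by
  intro text _
  unfold Spec_split_infobox_and_body_py split_infobox_and_body_py split_infobox_and_body_py_alt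
  match text with
  | none => rfl
  | some s =>
    simp only
    by_cases hst : PySem.Chars.find s.toList "{{Infobox".toList = -1
    · rw [if_pos hst, if_pos hst]
    · rw [if_neg hst, if_neg hst]
      have hle : (PySem.Chars.find s.toList "{{Infobox".toList).toNat ≤ s.toList.length := by
        have := PySem.Chars.findFrom_natCast_spec s.toList "{{Infobox".toList 0 (by omega)
        rw [Nat.cast_zero, PySem.Chars.findFrom_zero] at this
        obtain ⟨_, h2, _⟩ := this hst
        have := h2.length_le
        rw [List.length_drop] at this
        have h9 : ("{{Infobox".toList).length = 9 := rfl
        omega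
      rw [pvScan_eq s.toList _ 0 hle]
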